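-- pv_equiv track=rewrite | github.com/DharmikPrajapati23/Compiler_Design | clr_lalr.py | lr1_goto
-- ===== SOURCE A (Python) =====
-- def first_of_seq(seq, first, Glst):
--     nts_set = set(Glst.keys())
--     out = set()
--     if not seq:
--         out.add("ε")
--         return out
--     for X in seq:
--         if X in nts_set:
--             out |= (first[X] - {"ε"})
--             if "ε" not in first[X]:
--                 break
--         else:
--             out.add(X)
--             break
--     else:
--         out.add("ε")
--     return out
--
-- def lr1_closure(I, Glst, first):
--     I = set(I)
--     nts = set(Glst.keys())
--     changed = True
--     while changed:
--         changed = False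
--         add_list = []
--         for (A, beta, dot, la) in list(I):
--             if dot < len(beta):
--                 X = beta[dot]
--                 if X in nts:
--                     tail = list(beta[dot+1:])
--                     la_set = first_of_seq(tail + [la], first, Glst)
--                     for prod in Glst[X]:
--                         for a in la_set:
--                             if a == "ε":
--                                 continue
--                             it = (X, tuple(prod), 0, a)
--                             if it not in I and it not in add_list:
--                                 add_list.append(it)
--         if add_list:
--             I.update(add_list)
--             changed = True
--     return I
--
-- def lr1_goto(I, X, Glst, first):
--     J = set()
--     for (A, beta, dot, la) in I:
--         if dot < len(beta) and beta[dot] == X: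
--             J.add((A, beta, dot+1, la))
--     if not J:
--         return set()
--     return lr1_closure(J, Glst, first)
-- ===== SOURCE B (Python) =====
-- # Worklist (frontier) closure: each round expands only the items added in the
-- # previous round and deduplicates with one 'seen' set, instead of re-scanning
-- # the whole item set every round with a linear scan over add_list.
--
-- def _first_seq(seq, first, nts):
--     if not seq:
--         return {"\u03b5"}
--     Y = seq[0]
--     if Y not in nts:
--         return {Y}
--     fx = first[Y]
--     if "\u03b5" in fx:
--         return (fx - {"\u03b5"}) | _first_seq(seq[1:], first, nts)
--     return fx - {"\u03b5"}
--
-- def lr1_goto(I, X, Glst, first):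
--     nts = set(Glst)
--     seen = set()
--     frontier = []
--     for (A, beta, dot, la) in I:
--         if dot < len(beta) and beta[dot] == X:
--             it = (A, beta, dot + 1, la)
--             if it not in seen:
--                 seen.add(it)
--                 frontier.append(it)
--     while frontier:
--         new = []
--         for (A, beta, dot, la) in frontier:
--             if dot < len(beta):
--                 Y = beta[dot]
--                 if Y in nts:
--                     las = _first_seq(list(beta[dot + 1:]) + [la], first, nts)
--                     for prod in Glst[Y]:
--                         for a in las:
--                             if a != "\u03b5":
--                                 it = (Y, tuple(prod), 0, a)
--                                 if it not in seen:
--                                     seen.add(it)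
--                                     new.append(it)
--         frontier = new
--     return seen
-- ===== Notes on version B (the rewrite author's own statement) =====
-- stated objective: alternative
-- what changed: B replaces A's fixpoint loop that re-scans the entire item set every round (deduplicating via a linear scan of add_list) with a frontier worklist that expands only the items added in the previous round and deduplicates against a single seen set; the FIRST helper becomes a direct recursion on the sequence.
import Mathlib
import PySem

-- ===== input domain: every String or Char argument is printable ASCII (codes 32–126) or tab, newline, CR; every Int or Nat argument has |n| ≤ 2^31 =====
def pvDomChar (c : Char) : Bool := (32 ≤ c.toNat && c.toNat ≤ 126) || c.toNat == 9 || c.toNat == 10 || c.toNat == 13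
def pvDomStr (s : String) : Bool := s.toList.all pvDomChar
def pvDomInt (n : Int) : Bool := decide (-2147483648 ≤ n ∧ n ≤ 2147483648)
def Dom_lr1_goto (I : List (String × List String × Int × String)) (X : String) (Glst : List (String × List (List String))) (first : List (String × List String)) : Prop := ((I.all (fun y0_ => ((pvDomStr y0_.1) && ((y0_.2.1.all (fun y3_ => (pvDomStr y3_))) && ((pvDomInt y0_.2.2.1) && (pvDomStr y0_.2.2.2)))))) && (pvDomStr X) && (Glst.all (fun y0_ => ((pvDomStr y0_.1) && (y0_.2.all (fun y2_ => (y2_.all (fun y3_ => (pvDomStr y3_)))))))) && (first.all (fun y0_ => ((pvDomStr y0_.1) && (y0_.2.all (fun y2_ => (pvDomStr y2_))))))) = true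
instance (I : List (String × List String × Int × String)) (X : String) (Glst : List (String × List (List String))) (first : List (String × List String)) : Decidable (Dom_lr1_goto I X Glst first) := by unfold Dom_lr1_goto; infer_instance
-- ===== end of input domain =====

-- B's change in one line: a frontier worklist closure that expands only newly added items
-- with one 'seen' set, instead of A's rounds that re-scan the whole item set each time.

-- An LR(1) item (A, beta, dot, la).
abbrev PvIt := String × List String × Int × String

-- Shared totality fuel for the closure loops of both ports (a bound on the number of
-- rounds: each round before the last adds at least one item, and all ever-added items
-- come from the finite candidate space counted here).  It is a totality device only:
-- the equivalence theorem holds for every fuel value, fed equally to both loops.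
def pvFuel (J : List PvIt) (Glst : List (String × List (List String))) (first : List (String × List String)) : Nat :=
  J.length
    + ((Glst.map (fun p => p.2.length)).sum)
      * (1 + (first.map (fun p => p.2.length)).sum
           + (J.map (fun it => it.2.1.length + 1)).sum
           + (Glst.map (fun p => (p.2.map List.length).sum)).sum)
    + 1

-- ===== PORT A =====

-- first_of_seq: the for-loop over seq with its for-else clause ([] case = else: out.add("ε")).
def pvFosALoop (first : List (String × List String)) (nts : List String) : List String → List String → List String
  | [], out => PySem.Set.add out "ε"
  | Y :: rest, out =>
    if PySem.Set.contains nts Y then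
      -- Python first[Y]; the KeyError case (get? = none) is excluded by Pre_
      let fx := (PySem.Dict.get? (PySem.Dict.mk first) Y).getD []
      let out2 := PySem.Set.union out (PySem.Set.diff (PySem.Set.ofList fx) (PySem.Set.ofList ["ε"]))
      if fx.contains "ε" then pvFosALoop first nts rest out2 else out2
    else PySem.Set.add out Y

def pvFirstOfSeqA (seq : List String) (first : List (String × List String)) (Glst : List (String × List (List String))) : List String :=
  let nts_set := PySem.Set.ofList (PySem.Dict.keys (PySem.Dict.mk Glst))
  if seq = [] then PySem.Set.add PySem.Set.empty "ε"
  else pvFosALoop first nts_set seq PySem.Set.empty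

-- one item of A's round: extend add_list with this item's new candidates
-- (`it not in I and it not in add_list`)
def pvAddCandsA (Glst : List (String × List (List String))) (first : List (String × List String)) (nts : List String) (Icur : List PvIt) (add_list : List PvIt) (item : PvIt) : List PvIt :=
  match item with
  | (_A, beta, dot, la) =>
    if dot < (beta.length : Int) then
      match PySem.List.pyGet? beta dot with
      | none => add_list        -- IndexError (dot < -len beta); excluded by Pre_
      | some Y =>
        if PySem.Set.contains nts Y then
          let tail := PySem.List.slice beta (some (dot + 1)) none
          let la_set := pvFirstOfSeqA (tail ++ [la]) first Glst
          ((PySem.Dict.get? (PySem.Dict.mk Glst) Y).getD []).foldl (fun acc prod =>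
            la_set.foldl (fun acc a =>
              if a = "ε" then acc
              else if Icur.contains (Y, prod, (0 : Int), a) || acc.contains (Y, prod, (0 : Int), a) then acc
              else acc ++ [(Y, prod, (0 : Int), a)]) acc) add_list
        else add_list
    else add_list

-- the while-changed loop of lr1_closure
def pvClosureALoop (Glst : List (String × List (List String))) (first : List (String × List String)) (nts : List String) : Nat → List PvIt → List PvIt
  | 0, Icur => Icur
  | fuel + 1, Icur =>
    let add_list := Icur.foldl (pvAddCandsA Glst first nts Icur) []
    if add_list = [] then Icur
    else pvClosureALoop Glst first nts fuel (PySem.Set.update Icur add_list)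

def pvLr1ClosureA (Jset : List PvIt) (Glst : List (String × List (List String))) (first : List (String × List String)) : List PvIt :=
  let Icur := PySem.Set.ofList Jset
  let nts := PySem.Set.ofList (PySem.Dict.keys (PySem.Dict.mk Glst))
  pvClosureALoop Glst first nts (pvFuel Icur Glst first) Icur

-- one item of the J-building loop: add the shifted item when beta[dot] == X
def pvShiftA (X : String) (J : List PvIt) (item : PvIt) : List PvIt :=
  match item with
  | (A, beta, dot, la) =>
    if dot < (beta.length : Int) then
      match PySem.List.pyGet? beta dot with
      | some s => if s = X then PySem.Set.add J (A, beta, dot + 1, la) else J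
      | none => J        -- IndexError; excluded by Pre_
    else J

def lr1_goto (I : List (String × List String × Int × String)) (X : String) (Glst : List (String × List (List String))) (first : List (String × List String)) : List (String × List String × Int × String) :=
  let J := I.foldl (pvShiftA X) PySem.Set.empty
  if J = [] then [] else pvLr1ClosureA J Glst first

-- ===== PORT B =====

-- B's FIRST-of-sequence, by direct recursion on the sequence
def pvFosB (first : List (String × List String)) (nts : List String) : List String → List String
  | [] => PySem.Set.add PySem.Set.empty "ε"
  | Y :: rest =>
    if PySem.Set.contains nts Y then
      let fx := PySem.Set.ofList ((PySem.Dict.get? (PySem.Dict.mk first) Y).getD [])     -- Python first[Y]; KeyError excluded by Pre_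
      if fx.contains "ε" then
        PySem.Set.union (PySem.Set.diff fx (PySem.Set.ofList ["ε"])) (pvFosB first nts rest)
      else PySem.Set.diff fx (PySem.Set.ofList ["ε"])
    else PySem.Set.add PySem.Set.empty Y

-- one frontier item: extend (seen, new) with this item's candidates not yet seen
def pvStepB (Glst : List (String × List (List String))) (first : List (String × List String)) (nts : List String) (acc : List PvIt × List PvIt) (item : PvIt) : List PvIt × List PvIt :=
  match item with
  | (_A, beta, dot, la) =>
    if dot < (beta.length : Int) then
      match PySem.List.pyGet? beta dot with
      | none => acc        -- IndexError; excluded by Pre_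
      | some Y =>
        if PySem.Set.contains nts Y then
          let las := pvFosB first nts (PySem.List.slice beta (some (dot + 1)) none ++ [la])
          ((PySem.Dict.get? (PySem.Dict.mk Glst) Y).getD []).foldl (fun acc prod =>
            las.foldl (fun (acc : List PvIt × List PvIt) a =>
              if a = "ε" then acc
              else
                let it := (Y, prod, (0 : Int), a)
                if acc.1.contains it then acc else (acc.1 ++ [it], acc.2 ++ [it])) acc) acc
        else acc
    else acc

-- the worklist loop: process the frontier, recurse on the newly added items
def pvClosureBLoop (Glst : List (String × List (List String))) (first : List (String × List String)) (nts : List String) : Nat → List PvIt → List PvIt → List PvIt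
  | 0, seen, _ => seen
  | fuel + 1, seen, frontier =>
    if frontier = [] then seen
    else
      let sn := frontier.foldl (pvStepB Glst first nts) (seen, [])
      pvClosureBLoop Glst first nts fuel sn.1 sn.2

-- one item of B's kernel loop: add the shifted item to seen and to the initial frontier
def pvShiftB (X : String) (sf : List PvIt × List PvIt) (item : PvIt) : List PvIt × List PvIt :=
  match item with
  | (A, beta, dot, la) =>
    if dot < (beta.length : Int) then
      match PySem.List.pyGet? beta dot with
      | some s =>
        if s = X then
          let it := (A, beta, dot + 1, la)
          if sf.1.contains it then sf else (sf.1 ++ [it], sf.2 ++ [it])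
        else sf
      | none => sf        -- IndexError; excluded by Pre_
    else sf

def lr1_goto_alt (I : List (String × List String × Int × String)) (X : String) (Glst : List (String × List (List String))) (first : List (String × List String)) : List (String × List String × Int × String) :=
  let nts := PySem.Set.ofList (PySem.Dict.keys (PySem.Dict.mk Glst))
  let sf := I.foldl (pvShiftB X) ((PySem.Set.empty : List PvIt), ([] : List PvIt))
  pvClosureBLoop Glst first nts (pvFuel sf.1 Glst first) sf.1 sf.2

-- ===== PRECONDITION & SPEC =====
-- Pre_ excludes exactly the inputs where the Python A raises an IndexError (an item whose
-- dot is below -len(beta) while dot < len(beta)) and, only when some item of I shifts on X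
-- (otherwise the closure never runs and nothing is looked up), the inputs where a Glst
-- nonterminal missing from first occurs in a position first[] can be consulted at — in a
-- shifted item's tail beta[dot+2:] or as its lookahead, in the tail prod[1:] of a Glst
-- production, or in a first value — on all of which B raises the same KeyError; this
-- syntactic occurrence test is slightly wider than the dynamic KeyError set when the
-- occurrence is unreachable by the closure (see the cite in claim.json).
def Pre_lr1_goto (I : List (String × List String × Int × String)) (X : String) (Glst : List (String × List (List String))) (first : List (String × List String)) : Prop :=
  (∀ it ∈ I, it.2.2.1 < (it.2.1.length : Int) → -(it.2.1.length : Int) ≤ it.2.2.1)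
  ∧ ((¬ ∃ it ∈ I, it.2.2.1 < (it.2.1.length : Int) ∧ PySem.List.pyGet? it.2.1 it.2.2.1 = some X)
     ∨ ∀ Z ∈ Glst, (∀ q ∈ first, q.1 ≠ Z.1) →
         (∀ it ∈ I, it.2.2.1 < (it.2.1.length : Int) → PySem.List.pyGet? it.2.1 it.2.2.1 = some X →
            Z.1 ∉ PySem.List.slice it.2.1 (some (it.2.2.1 + 2)) none ∧ Z.1 ≠ it.2.2.2)
         ∧ (∀ p ∈ Glst, ∀ prod ∈ p.2, Z.1 ∉ prod.drop 1)
         ∧ (∀ q ∈ first, Z.1 ∉ q.2))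
instance (I : List (String × List String × Int × String)) (X : String) (Glst : List (String × List (List String))) (first : List (String × List String)) : Decidable (Pre_lr1_goto I X Glst first) := by unfold Pre_lr1_goto; infer_instance

def pvWitness_lr1_goto : (List (String × List String × Int × String)) × String × (List (String × List (List String))) × (List (String × List String)) :=
  ([("S", ["a", "A"], 0, "$")], "a", [("A", [["a"]])], [("A", ["a"])])

def Spec_lr1_goto (I : List (String × List String × Int × String)) (X : String) (Glst : List (String × List (List String))) (first : List (String × List String)) (out : List (String × List String × Int × String)) : Prop := out = lr1_goto_alt I X Glst first
instance (I : List (String × List String × Int × String)) (X : String) (Glst : List (String × List (List String))) (first : List (String × List String)) (out : List (String × List String × Int × String)) : Decidable (Spec_lr1_goto I X Glst first out) := by unfold Spec_lr1_goto; infer_instance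

-- ===== CLAIM (what is proved, stated in full; the proofs are below) =====
def Claim_equal_lr1_goto : Prop := ∀ (I : List (String × List String × Int × String)) (X : String) (Glst : List (String × List (List String))) (first : List (String × List String)), Dom_lr1_goto I X Glst first → Pre_lr1_goto I X Glst first → Spec_lr1_goto I X Glst first (lr1_goto I X Glst first)

-- ===== LEMMAS AND PROOFS =====

-- The per-item candidate list both rounds are really adding (B's helper shape).
def pvCands (Glst : List (String × List (List String))) (first : List (String × List String)) (nts : List String) (item : PvIt) : List PvIt :=
  match item with
  | (_A, beta, dot, la) =>
    if dot < (beta.length : Int) then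
      match PySem.List.pyGet? beta dot with
      | none => []
      | some Y =>
        if PySem.Set.contains nts Y then
          ((PySem.Dict.get? (PySem.Dict.mk Glst) Y).getD []).flatMap (fun prod =>
            (pvFosB first nts (PySem.List.slice beta (some (dot + 1)) none ++ [la])).filterMap (fun a =>
              if a = "ε" then none else some (Y, prod, (0 : Int), a)))
        else []
    else []

-- abstract round step: absorb one item's candidates into the state
def pvF (Glst : List (String × List (List String))) (first : List (String × List String)) (nts : List String) (S : List PvIt) (item : PvIt) : List PvIt :=
  PySem.Set.update S (pvCands Glst first nts item)

-- ---- generic PySem.Set facts specific to the shapes used by the two programs ----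

theorem pv_contains_ofList {α : Type} [BEq α] [LawfulBEq α] (l : List α) (x : α) :
    (PySem.Set.ofList l).contains x = l.contains x := by
  simp [PySem.Set.mem_ofList]

theorem pv_union_add {α : Type} [BEq α] [LawfulBEq α] (s t : List α) (a : α) :
    PySem.Set.union s (PySem.Set.add t a) = PySem.Set.add (PySem.Set.union s t) a := by
  by_cases h : a ∈ t
  · rw [PySem.Set.add_of_mem h, PySem.Set.add_of_mem]
    exact (PySem.Set.mem_union _ _ _).mpr (Or.inr h)
  · rw [PySem.Set.add_of_not_mem h]
    show PySem.Set.update s (t ++ [a]) = _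
    rw [PySem.Set.update_append, PySem.Set.update_cons, PySem.Set.update_nil]
    rfl

theorem pv_union_assoc {α : Type} [BEq α] [LawfulBEq α] (s t u : List α) :
    PySem.Set.union s (PySem.Set.union t u) = PySem.Set.union (PySem.Set.union s t) u := by
  induction u generalizing t with
  | nil => rfl
  | cons a u ih =>
    show PySem.Set.union s (PySem.Set.update t (a :: u)) = PySem.Set.update (PySem.Set.union s t) (a :: u)
    rw [PySem.Set.update_cons, PySem.Set.update_cons]
    calc PySem.Set.union s (PySem.Set.update (PySem.Set.add t a) u)
        = PySem.Set.union (PySem.Set.union s (PySem.Set.add t a)) u := ih (PySem.Set.add t a)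
      _ = PySem.Set.update (PySem.Set.add (PySem.Set.union s t) a) u := by rw [pv_union_add s t a]; rfl

-- ---- the two FIRST-of-sequence helpers compute the same set (same list) ----

theorem pv_fosB_nodup (first : List (String × List String)) (nts : List String) :
    ∀ seq : List String, (pvFosB first nts seq).Nodup := by
  intro seq
  induction seq with
  | nil => exact PySem.Set.nodup_add _ _ List.nodup_nil
  | cons Y rest ih =>
    simp only [pvFosB]
    split
    · split
      · exact PySem.Set.nodup_union _ _ (PySem.Set.nodup_diff _ _ (PySem.Set.nodup_ofList _))
      · exact PySem.Set.nodup_diff _ _ (PySem.Set.nodup_ofList _)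
    · exact PySem.Set.nodup_add _ _ List.nodup_nil

theorem pv_fos_eq (first : List (String × List String)) (nts : List String) (seq out : List String) :
    pvFosALoop first nts seq out = PySem.Set.union out (pvFosB first nts seq) := by
  induction seq generalizing out with
  | nil => rfl
  | cons Y rest ih =>
    simp only [pvFosALoop, pvFosB]
    cases hN : PySem.Set.contains nts Y with
    | false => simp; rfl
    | true =>
      rw [pv_contains_ofList]
      cases hε : ((PySem.Dict.get? (PySem.Dict.mk first) Y).getD []).contains "ε" with
      | false => simp
      | true => simp [ih, pv_union_assoc]

theorem pv_firstOfSeqA_eq (seq : List String) (first : List (String × List String)) (Glst : List (String × List (List String))) :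
    pvFirstOfSeqA seq first Glst = pvFosB first (PySem.Set.ofList (PySem.Dict.keys (PySem.Dict.mk Glst))) seq := by
  cases seq with
  | nil => rfl
  | cons Y rest =>
    show pvFosALoop _ _ (Y :: rest) PySem.Set.empty = _
    rw [pv_fos_eq]
    show PySem.Set.update [] (pvFosB _ _ (Y :: rest)) = _
    rw [PySem.Set.update_nil_left, PySem.Set.ofList_eq_self_of_nodup _ (pv_fosB_nodup _ _ _)]

-- ---- prefix / update bookkeeping ----

theorem pv_add_prefix {α : Type} [BEq α] (s : List α) (a : α) : s <+: PySem.Set.add s a := by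
  unfold PySem.Set.add
  split
  · exact List.prefix_refl s
  · exact ⟨[a], rfl⟩

theorem pv_update_prefix {α : Type} [BEq α] : ∀ (cs : List α) (s : List α), s <+: PySem.Set.update s cs := by
  intro cs
  induction cs with
  | nil => intro s; rw [PySem.Set.update_nil]
  | cons c cs ih =>
    intro s
    rw [PySem.Set.update_cons]
    exact List.IsPrefix.trans (pv_add_prefix s c) (ih (PySem.Set.add s c))

theorem pv_foldl_prefix {α β : Type} (f : List α → β → List α) (hf : ∀ s b, s <+: f s b) :
    ∀ (l : List β) (s : List α), s <+: l.foldl f s := by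
  intro l
  induction l with
  | nil => intro s; exact List.prefix_refl s
  | cons b l ih => intro s; exact List.IsPrefix.trans (hf s b) (ih (f s b))

theorem pv_drop_comp {α : Type} (S T R n : List α) (hST : S <+: T) (hTR : T <+: R) :
    n ++ R.drop S.length = (n ++ T.drop S.length) ++ R.drop T.length := by
  obtain ⟨a, rfl⟩ := hST
  obtain ⟨b, rfl⟩ := hTR
  rw [List.append_assoc S a b, List.drop_left, List.drop_left,
      ← List.append_assoc S a b, List.drop_left, List.append_assoc]

theorem pv_update_eq_self {α : Type} [BEq α] [LawfulBEq α] :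
    ∀ (cs s : List α), (∀ c ∈ cs, c ∈ s) → PySem.Set.update s cs = s := by
  intro cs
  induction cs with
  | nil => intro s _; exact PySem.Set.update_nil s
  | cons c cs ih =>
    intro s h
    rw [PySem.Set.update_cons, PySem.Set.add_of_mem (h c (by simp))]
    exact ih s fun c hc => h c (by simp [hc])

-- ---- A's add_list accumulation is the abstract step pvF ----

theorem pv_innerA_eq (Icur : List PvIt) (Y : String) (prod : List String) :
    ∀ (las : List String) (acc : List PvIt),
      Icur ++ las.foldl (fun acc a =>
          if a = "ε" then acc
          else if Icur.contains (Y, prod, (0 : Int), a) || acc.contains (Y, prod, (0 : Int), a) then acc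
          else acc ++ [(Y, prod, (0 : Int), a)]) acc
        = PySem.Set.update (Icur ++ acc)
            (las.filterMap (fun a => if a = "ε" then none else some (Y, prod, (0 : Int), a))) := by
  intro las
  induction las with
  | nil => intro acc; rw [List.foldl_nil, List.filterMap_nil, PySem.Set.update_nil]
  | cons a las ih =>
    intro acc
    by_cases ha : a = "ε"
    · simp only [List.foldl_cons, List.filterMap_cons, ha, reduceIte]
      exact ih acc
    · simp only [List.foldl_cons, List.filterMap_cons, if_neg ha, PySem.Set.update_cons]
      cases hc : Icur.contains (Y, prod, (0 : Int), a) || acc.contains (Y, prod, (0 : Int), a) with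
      | true =>
        simp only [reduceIte]
        rw [PySem.Set.add_of_mem (by
          have : (Icur ++ acc).contains (Y, prod, (0 : Int), a) = true := by
            rw [List.contains_append, hc]
          exact List.contains_iff_mem.mp this)]
        exact ih acc
      | false =>
        simp only [Bool.false_eq_true, reduceIte]
        rw [PySem.Set.add_of_not_mem (by
          intro hmem
          have : (Icur ++ acc).contains (Y, prod, (0 : Int), a) = true := List.contains_iff_mem.mpr hmem
          rw [List.contains_append, hc] at this
          exact Bool.false_ne_true this)]
        rw [List.append_assoc]
        exact ih (acc ++ [(Y, prod, (0 : Int), a)])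

theorem pv_prodsA_eq (Icur : List PvIt) (Y : String) (las : List String) :
    ∀ (prods : List (List String)) (acc : List PvIt),
      Icur ++ prods.foldl (fun acc prod =>
          las.foldl (fun acc a =>
            if a = "ε" then acc
            else if Icur.contains (Y, prod, (0 : Int), a) || acc.contains (Y, prod, (0 : Int), a) then acc
            else acc ++ [(Y, prod, (0 : Int), a)]) acc) acc
        = PySem.Set.update (Icur ++ acc)
            (prods.flatMap (fun prod =>
              las.filterMap (fun a => if a = "ε" then none else some (Y, prod, (0 : Int), a)))) := by
  intro prods
  induction prods with
  | nil => intro acc; rw [List.foldl_nil, List.flatMap_nil, PySem.Set.update_nil]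
  | cons p ps ih =>
    intro acc
    rw [List.foldl_cons, List.flatMap_cons, PySem.Set.update_append, ← pv_innerA_eq Icur Y p las acc]
    exact ih _

theorem pv_addA_eq (Glst : List (String × List (List String))) (first : List (String × List String)) (Icur acc : List PvIt) (item : PvIt) :
    Icur ++ pvAddCandsA Glst first (PySem.Set.ofList (PySem.Dict.keys (PySem.Dict.mk Glst))) Icur acc item
      = pvF Glst first (PySem.Set.ofList (PySem.Dict.keys (PySem.Dict.mk Glst))) (Icur ++ acc) item := by
  obtain ⟨A, beta, dot, la⟩ := item
  simp only [pvAddCandsA, pvCands, pvF]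
  by_cases h1 : dot < (beta.length : Int)
  · simp only [if_pos h1]
    cases hg : PySem.List.pyGet? beta dot with
    | none => rw [PySem.Set.update_nil]
    | some Y =>
      cases hN : PySem.Set.contains (PySem.Set.ofList (PySem.Dict.keys (PySem.Dict.mk Glst))) Y with
      | false => simp only [hN, Bool.false_eq_true, reduceIte, PySem.Set.update_nil]
      | true =>
        simp only [hN, reduceIte, pv_firstOfSeqA_eq]
        exact pv_prodsA_eq Icur Y _ _ acc
  · simp only [if_neg h1, PySem.Set.update_nil]

theorem pv_roundA_eq (Glst : List (String × List (List String))) (first : List (String × List String)) (Icur : List PvIt) :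
    ∀ (l : List PvIt) (acc : List PvIt),
      Icur ++ l.foldl (pvAddCandsA Glst first (PySem.Set.ofList (PySem.Dict.keys (PySem.Dict.mk Glst))) Icur) acc
        = l.foldl (pvF Glst first (PySem.Set.ofList (PySem.Dict.keys (PySem.Dict.mk Glst)))) (Icur ++ acc) := by
  intro l
  induction l with
  | nil => intro acc; rfl
  | cons u l ih => intro acc; rw [List.foldl_cons, List.foldl_cons, ih, pv_addA_eq]

-- ---- B's (seen, new) pair fold is the same abstract step, tracking the appended suffix ----

theorem pv_pairfold : ∀ (cs : List PvIt) (S n : List PvIt),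
    cs.foldl (fun acc c => if acc.1.contains c then acc else (acc.1 ++ [c], acc.2 ++ [c])) (S, n)
      = (PySem.Set.update S cs, n ++ (PySem.Set.update S cs).drop S.length) := by
  intro cs
  induction cs with
  | nil => intro S n; rw [List.foldl_nil, PySem.Set.update_nil, List.drop_length, List.append_nil]
  | cons c cs ih =>
    intro S n
    rw [List.foldl_cons, PySem.Set.update_cons]
    cases hc : S.contains c with
    | true =>
      simp only [reduceIte]
      rw [PySem.Set.add_of_mem (List.contains_iff_mem.mp hc)]
      exact ih S n
    | false =>
      simp only [Bool.false_eq_true, reduceIte]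
      rw [PySem.Set.add_of_not_mem (fun hm => Bool.false_ne_true (hm |> List.contains_iff_mem.mpr |> (hc ▸ ·)))]
      rw [ih (S ++ [c]) (n ++ [c]),
          pv_drop_comp S (S ++ [c]) (PySem.Set.update (S ++ [c]) cs) n ⟨[c], rfl⟩ (pv_update_prefix cs (S ++ [c])),
          List.drop_left]

theorem pv_skipfold (Y : String) (prod : List String) :
    ∀ (las : List String) (sn : List PvIt × List PvIt),
      las.foldl (fun (acc : List PvIt × List PvIt) a =>
          if a = "ε" then acc
          else
            let it := (Y, prod, (0 : Int), a)
            if acc.1.contains it then acc else (acc.1 ++ [it], acc.2 ++ [it])) sn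
        = (las.filterMap (fun a => if a = "ε" then none else some (Y, prod, (0 : Int), a))).foldl
            (fun acc c => if acc.1.contains c then acc else (acc.1 ++ [c], acc.2 ++ [c])) sn := by
  intro las
  induction las with
  | nil => intro sn; rfl
  | cons a las ih =>
    intro sn
    by_cases ha : a = "ε"
    · simp only [List.foldl_cons, List.filterMap_cons, ha, reduceIte]
      exact ih sn
    · simp only [List.foldl_cons, List.filterMap_cons, if_neg ha]
      rw [ih]

theorem pv_prodsB_eq (Y : String) (las : List String) :
    ∀ (prods : List (List String)) (S n : List PvIt),
      prods.foldl (fun acc prod =>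
          las.foldl (fun (acc : List PvIt × List PvIt) a =>
            if a = "ε" then acc
            else
              let it := (Y, prod, (0 : Int), a)
              if acc.1.contains it then acc else (acc.1 ++ [it], acc.2 ++ [it])) acc) (S, n)
        = (PySem.Set.update S (prods.flatMap (fun prod =>
              las.filterMap (fun a => if a = "ε" then none else some (Y, prod, (0 : Int), a)))),
           n ++ (PySem.Set.update S (prods.flatMap (fun prod =>
              las.filterMap (fun a => if a = "ε" then none else some (Y, prod, (0 : Int), a))))).drop S.length) := by
  intro prods
  induction prods with
  | nil => intro S n; rw [List.foldl_nil, List.flatMap_nil, PySem.Set.update_nil, List.drop_length, List.append_nil]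
  | cons p ps ih =>
    intro S n
    rw [List.foldl_cons, pv_skipfold, pv_pairfold, ih, List.flatMap_cons, PySem.Set.update_append]
    rw [pv_drop_comp S (PySem.Set.update S (las.filterMap (fun a => if a = "ε" then none else some (Y, p, (0 : Int), a)))) _ n
          (pv_update_prefix _ S) (pv_update_prefix _ _)]

theorem pv_stepB_eq (Glst : List (String × List (List String))) (first : List (String × List String)) (S n : List PvIt) (item : PvIt) :
    pvStepB Glst first (PySem.Set.ofList (PySem.Dict.keys (PySem.Dict.mk Glst))) (S, n) item
      = (pvF Glst first (PySem.Set.ofList (PySem.Dict.keys (PySem.Dict.mk Glst))) S item,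
         n ++ (pvF Glst first (PySem.Set.ofList (PySem.Dict.keys (PySem.Dict.mk Glst))) S item).drop S.length) := by
  obtain ⟨A, beta, dot, la⟩ := item
  simp only [pvStepB, pvCands, pvF]
  by_cases h1 : dot < (beta.length : Int)
  · simp only [if_pos h1]
    cases hg : PySem.List.pyGet? beta dot with
    | none => rw [PySem.Set.update_nil, List.drop_length, List.append_nil]
    | some Y =>
      cases hN : PySem.Set.contains (PySem.Set.ofList (PySem.Dict.keys (PySem.Dict.mk Glst))) Y with
      | false =>
        simp only [hN, Bool.false_eq_true, reduceIte]
        rw [PySem.Set.update_nil, List.drop_length, List.append_nil]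
      | true =>
        simp only [hN, reduceIte]
        exact pv_prodsB_eq Y _ _ S n
  · simp only [if_neg h1]
    rw [PySem.Set.update_nil, List.drop_length, List.append_nil]

theorem pv_roundB_eq (Glst : List (String × List (List String))) (first : List (String × List String)) :
    ∀ (l : List PvIt) (S n : List PvIt),
      l.foldl (pvStepB Glst first (PySem.Set.ofList (PySem.Dict.keys (PySem.Dict.mk Glst)))) (S, n)
        = (l.foldl (pvF Glst first (PySem.Set.ofList (PySem.Dict.keys (PySem.Dict.mk Glst)))) S,
           n ++ (l.foldl (pvF Glst first (PySem.Set.ofList (PySem.Dict.keys (PySem.Dict.mk Glst)))) S).drop S.length) := by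
  intro l
  induction l with
  | nil => intro S n; rw [List.foldl_nil, List.foldl_nil, List.drop_length, List.append_nil]
  | cons u l ih =>
    intro S n
    rw [List.foldl_cons, List.foldl_cons, pv_stepB_eq, ih,
        pv_drop_comp S (pvF Glst first (PySem.Set.ofList (PySem.Dict.keys (PySem.Dict.mk Glst))) S u) _ n
          (pv_update_prefix _ S)
          (pv_foldl_prefix (pvF Glst first (PySem.Set.ofList (PySem.Dict.keys (PySem.Dict.mk Glst))))
            (fun s b => pv_update_prefix _ s) l _)]

-- ---- skip / coverage / loop-invariant facts ----

theorem pv_foldl_pres {σ β : Type} (g : σ → β → σ) (P : σ → Prop) (hg : ∀ s b, P s → P (g s b)) :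
    ∀ (l : List β) (s : σ), P s → P (l.foldl g s) := by
  intro l
  induction l with
  | nil => intro s hs; exact hs
  | cons b l ih => intro s hs; exact ih (g s b) (hg s b hs)

theorem pv_addA_pres (Glst : List (String × List (List String))) (first : List (String × List String)) (nts : List String) (Icur : List PvIt) (acc : List PvIt) (item : PvIt)
    (h : PySem.Set.update Icur acc = Icur ++ acc) :
    PySem.Set.update Icur (pvAddCandsA Glst first nts Icur acc item)
      = Icur ++ pvAddCandsA Glst first nts Icur acc item := by
  obtain ⟨A, beta, dot, la⟩ := item
  simp only [pvAddCandsA]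
  by_cases h1 : dot < (beta.length : Int)
  · simp only [if_pos h1]
    cases hg : PySem.List.pyGet? beta dot with
    | none => exact h
    | some Y =>
      cases hN : PySem.Set.contains nts Y with
      | false => simp only [hN, Bool.false_eq_true, reduceIte]; exact h
      | true =>
        simp only [hN, reduceIte]
        refine pv_foldl_pres _ (fun acc => PySem.Set.update Icur acc = Icur ++ acc) ?_ _ acc h
        intro acc prod hacc
        refine pv_foldl_pres _ (fun acc => PySem.Set.update Icur acc = Icur ++ acc) ?_ _ acc hacc
        intro acc a hacc2
        by_cases ha : a = "ε"
        · simpa [ha] using hacc2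
        · simp only [if_neg ha]
          cases hc : Icur.contains (Y, prod, (0 : Int), a) || acc.contains (Y, prod, (0 : Int), a) with
          | true => simpa [hc] using hacc2
          | false =>
            simp only [Bool.false_eq_true, reduceIte]
            rw [PySem.Set.update_append, hacc2, PySem.Set.update_cons, PySem.Set.update_nil,
                PySem.Set.add_of_not_mem (by
                  intro hmem
                  have : (Icur ++ acc).contains (Y, prod, (0 : Int), a) = true := List.contains_iff_mem.mpr hmem
                  rw [List.contains_append, hc] at this
                  exact Bool.false_ne_true this),
                List.append_assoc]
  · simp only [if_neg h1]; exact h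

theorem pv_roundA_update (Glst : List (String × List (List String))) (first : List (String × List String)) (nts : List String) (Icur : List PvIt) :
    PySem.Set.update Icur (Icur.foldl (pvAddCandsA Glst first nts Icur) [])
      = Icur ++ Icur.foldl (pvAddCandsA Glst first nts Icur) [] := by
  refine pv_foldl_pres _ (fun acc => PySem.Set.update Icur acc = Icur ++ acc)
    (fun acc item hacc => pv_addA_pres Glst first nts Icur acc item hacc) Icur [] ?_
  simp [PySem.Set.update_nil]

theorem pv_foldlF_skip (Glst : List (String × List (List String))) (first : List (String × List String)) (nts : List String) :
    ∀ (l : List PvIt) (S : List PvIt),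
      (∀ u ∈ l, ∀ c ∈ pvCands Glst first nts u, c ∈ S) → l.foldl (pvF Glst first nts) S = S := by
  intro l
  induction l with
  | nil => intro S _; rfl
  | cons u l ih =>
    intro S h
    rw [List.foldl_cons]
    have hu : pvF Glst first nts S u = S := pv_update_eq_self _ _ (h u (by simp))
    rw [hu]
    exact ih S fun v hv => h v (by simp [hv])

theorem pv_foldlF_covers (Glst : List (String × List (List String))) (first : List (String × List String)) (nts : List String) :
    ∀ (l : List PvIt) (S : List PvIt) (u : PvIt), u ∈ l →
      ∀ c ∈ pvCands Glst first nts u, c ∈ l.foldl (pvF Glst first nts) S := by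
  intro l
  induction l with
  | nil => intro S u hu; exact absurd hu (List.not_mem_nil)
  | cons v l ih =>
    intro S u hu c hc
    rcases List.mem_cons.mp hu with rfl | hu
    · have h1 : c ∈ pvF Glst first nts S u := (PySem.Set.mem_update _ _ _).mpr (Or.inr hc)
      rw [List.foldl_cons]
      exact (pv_foldl_prefix (pvF Glst first nts) (fun s b => pv_update_prefix _ s) l _).subset h1
    · rw [List.foldl_cons]; exact ih _ u hu c hc

theorem pv_closureB_nil (Glst : List (String × List (List String))) (first : List (String × List String)) (nts : List String) :
    ∀ (fuel : Nat) (S : List PvIt), pvClosureBLoop Glst first nts fuel S [] = S := by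
  intro fuel S
  cases fuel <;> simp [pvClosureBLoop]

theorem pv_closure_eq (Glst : List (String × List (List String))) (first : List (String × List String)) :
    ∀ (fuel : Nat) (old delta : List PvIt),
      (∀ u ∈ old, ∀ c ∈ pvCands Glst first (PySem.Set.ofList (PySem.Dict.keys (PySem.Dict.mk Glst))) u, c ∈ old ++ delta) →
      pvClosureALoop Glst first (PySem.Set.ofList (PySem.Dict.keys (PySem.Dict.mk Glst))) fuel (old ++ delta)
        = pvClosureBLoop Glst first (PySem.Set.ofList (PySem.Dict.keys (PySem.Dict.mk Glst))) fuel (old ++ delta) delta := by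
  intro fuel
  induction fuel with
  | zero => intro old delta _; rfl
  | succ f ih =>
    intro old delta h
    have hround : (old ++ delta) ++ (old ++ delta).foldl
        (pvAddCandsA Glst first (PySem.Set.ofList (PySem.Dict.keys (PySem.Dict.mk Glst))) (old ++ delta)) []
        = delta.foldl (pvF Glst first (PySem.Set.ofList (PySem.Dict.keys (PySem.Dict.mk Glst)))) (old ++ delta) := by
      have h1 := pv_roundA_eq Glst first (old ++ delta) (old ++ delta) []
      rw [List.append_nil] at h1
      rw [h1, List.foldl_append,
          pv_foldlF_skip Glst first _ old (old ++ delta) (fun u hu c hc => h u hu c hc)]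
    simp only [pvClosureALoop, pvClosureBLoop]
    cases hd : delta with
    | nil =>
      subst hd
      rw [List.foldl_nil] at hround
      have hadd : (old ++ ([] : List PvIt)).foldl
          (pvAddCandsA Glst first (PySem.Set.ofList (PySem.Dict.keys (PySem.Dict.mk Glst))) (old ++ [])) [] = [] :=
        List.append_cancel_left (hround.trans (List.append_nil _).symm)
      simp only [hadd, reduceIte]
    | cons d0 ds =>
      rw [← hd]
      have hdne : delta ≠ [] := by rw [hd]; exact List.cons_ne_nil d0 ds
      simp only [if_neg hdne]
      rw [pv_roundB_eq Glst first delta (old ++ delta) []]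
      simp only [List.nil_append]
      set R := delta.foldl (pvF Glst first (PySem.Set.ofList (PySem.Dict.keys (PySem.Dict.mk Glst)))) (old ++ delta) with hR
      set addl := (old ++ delta).foldl
        (pvAddCandsA Glst first (PySem.Set.ofList (PySem.Dict.keys (PySem.Dict.mk Glst))) (old ++ delta)) [] with haddl
      have hdrop : R.drop (old ++ delta).length = addl := by
        rw [← hround, List.drop_left]
      rw [hdrop]
      cases haddnil : addl with
      | nil =>
        simp only [reduceIte]
        have hReq : R = old ++ delta := by rw [← hround, haddnil, List.append_nil]
        rw [hReq, pv_closureB_nil]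
      | cons a0 as =>
        rw [← haddnil]
        have haddne : addl ≠ [] := by rw [haddnil]; exact List.cons_ne_nil a0 as
        simp only [if_neg haddne]
        have hupd : PySem.Set.update (old ++ delta) addl = (old ++ delta) ++ addl :=
          pv_roundA_update Glst first _ (old ++ delta)
        have hnew : ∀ u ∈ (old ++ delta), ∀ c ∈ pvCands Glst first (PySem.Set.ofList (PySem.Dict.keys (PySem.Dict.mk Glst))) u,
            c ∈ (old ++ delta) ++ addl := by
          intro u hu c hc
          rcases List.mem_append.mp hu with hu | hu
          · exact List.mem_append_left _ (h u hu c hc)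
          · rw [hround]
            exact pv_foldlF_covers Glst first _ delta (old ++ delta) u hu c hc
        have := ih (old ++ delta) addl hnew
        rw [hupd, this, hround]

-- ---- the two kernel (shift) loops build the same set, B also keeping it as its frontier ----

theorem pv_kernel_eq (X : String) :
    ∀ (l : List PvIt) (S : List PvIt),
      l.foldl (pvShiftB X) (S, S) = (l.foldl (pvShiftA X) S, l.foldl (pvShiftA X) S) := by
  intro l
  induction l with
  | nil => intro S; rfl
  | cons u l ih =>
    intro S
    obtain ⟨A, beta, dot, la⟩ := u
    simp only [List.foldl_cons, pvShiftA, pvShiftB]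
    by_cases h1 : dot < (beta.length : Int)
    · simp only [if_pos h1]
      cases hg : PySem.List.pyGet? beta dot with
      | none => exact ih S
      | some s =>
        by_cases hs : s = X
        · simp only [if_pos hs, PySem.Set.add, PySem.Set.contains]
          by_cases hm : (A, beta, dot + 1, la) ∈ S
          · have hc : S.contains (A, beta, dot + 1, la) = true := List.contains_iff_mem.mpr hm
            simp only [hc, reduceIte]
            exact ih S
          · have hc : S.contains (A, beta, dot + 1, la) = false := by
              cases hcc : S.contains (A, beta, dot + 1, la) with
              | false => rfl
              | true => exact absurd (List.contains_iff_mem.mp hcc) hm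
            simp only [hc, Bool.false_eq_true, reduceIte]
            exact ih (S ++ [(A, beta, dot + 1, la)])
        · simp only [if_neg hs]; exact ih S
    · simp only [if_neg h1]; exact ih S

theorem pv_kernel_nodup (X : String) (l : List PvIt) :
    (l.foldl (pvShiftA X) (PySem.Set.empty : List PvIt)).Nodup := by
  refine pv_foldl_pres _ (fun (S : List PvIt) => S.Nodup) ?_ l (PySem.Set.empty : List PvIt) List.nodup_nil
  intro S u hS
  obtain ⟨A, beta, dot, la⟩ := u
  simp only [pvShiftA]
  split
  · split
    · split
      · exact PySem.Set.nodup_add _ _ hS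
      · exact hS
    · exact hS
  · exact hS

-- ===== VERDICT (by name: the statement is the Claim_ definition above) =====
theorem lr1_goto_spec : Claim_equal_lr1_goto := by
  intro I X Glst first _dom _pre
  show lr1_goto I X Glst first = lr1_goto_alt I X Glst first
  show (if (I.foldl (pvShiftA X) PySem.Set.empty) = [] then []
        else pvLr1ClosureA (I.foldl (pvShiftA X) PySem.Set.empty) Glst first)
      = pvClosureBLoop Glst first (PySem.Set.ofList (PySem.Dict.keys (PySem.Dict.mk Glst)))
          (pvFuel (I.foldl (pvShiftB X) ((PySem.Set.empty : List PvIt), (PySem.Set.empty : List PvIt))).1 Glst first)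
          (I.foldl (pvShiftB X) ((PySem.Set.empty : List PvIt), (PySem.Set.empty : List PvIt))).1
          (I.foldl (pvShiftB X) ((PySem.Set.empty : List PvIt), (PySem.Set.empty : List PvIt))).2
  rw [pv_kernel_eq X I (PySem.Set.empty : List PvIt)]
  by_cases hJ : I.foldl (pvShiftA X) (PySem.Set.empty : List PvIt) = []
  · rw [if_pos hJ, hJ, pv_closureB_nil]
  · rw [if_neg hJ]
    have hnd : (I.foldl (pvShiftA X) (PySem.Set.empty : List PvIt)).Nodup := pv_kernel_nodup X I
    have h1 : PySem.Set.ofList (I.foldl (pvShiftA X) (PySem.Set.empty : List PvIt))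
        = I.foldl (pvShiftA X) (PySem.Set.empty : List PvIt) :=
      PySem.Set.ofList_eq_self_of_nodup _ hnd
    have h2 : pvLr1ClosureA (I.foldl (pvShiftA X) (PySem.Set.empty : List PvIt)) Glst first
        = pvClosureALoop Glst first (PySem.Set.ofList (PySem.Dict.keys (PySem.Dict.mk Glst)))
            (pvFuel (I.foldl (pvShiftA X) (PySem.Set.empty : List PvIt)) Glst first)
            (I.foldl (pvShiftA X) (PySem.Set.empty : List PvIt)) := by
      calc pvLr1ClosureA (I.foldl (pvShiftA X) (PySem.Set.empty : List PvIt)) Glst first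
          = pvClosureALoop Glst first (PySem.Set.ofList (PySem.Dict.keys (PySem.Dict.mk Glst)))
              (pvFuel (PySem.Set.ofList (I.foldl (pvShiftA X) (PySem.Set.empty : List PvIt))) Glst first)
              (PySem.Set.ofList (I.foldl (pvShiftA X) (PySem.Set.empty : List PvIt))) := rfl
        _ = _ := by rw [h1]
    rw [h2]
    simpa using pv_closure_eq Glst first
      (pvFuel (I.foldl (pvShiftA X) (PySem.Set.empty : List PvIt)) Glst first)
      [] (I.foldl (pvShiftA X) (PySem.Set.empty : List PvIt))
      (fun u hu => absurd hu (List.not_mem_nil))
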